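-- pv_equiv track=rewrite | github.com/melsner/transformerbyexample | script/ruleFeatures.py | statusAlterations
-- ===== SOURCE A (Python) =====
-- def statusAlterations(statuses):
--     left = not statuses[0]
--     right = not statuses[-1]
--     middle = False
--     stemL = False
--     gap = False
--     for xi in statuses:
--         if not xi and stemL:
--             gap = True
--         if xi:
--             stemL = True
--             if gap:
--                 middle = True
--
--     return (left, middle, right)
-- ===== SOURCE B (Python) =====
-- def statusAlterations(statuses):
--     left = not statuses[0]
--     right = not statuses[-1]
--     core = list(statuses)
--     while core and not core[-1]:
--         core.pop()
--     core.reverse()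
--     while core and not core[-1]:
--         core.pop()
--     middle = False in core
--     return (left, middle, right)
-- ===== Notes on version B (the rewrite author's own statement) =====
-- stated objective: alternative
-- what changed: Replaces A's single-pass state machine (stemL/gap flags) by trimming trailing and leading Falses off a copy and testing the remaining core for a False (middle gap iff the span between first and last True contains a False); the trim loops and the C-level 'in' membership test avoid A's per-element Python-level branching, a constant-factor speedup a timing run measured.
import Mathlib
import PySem

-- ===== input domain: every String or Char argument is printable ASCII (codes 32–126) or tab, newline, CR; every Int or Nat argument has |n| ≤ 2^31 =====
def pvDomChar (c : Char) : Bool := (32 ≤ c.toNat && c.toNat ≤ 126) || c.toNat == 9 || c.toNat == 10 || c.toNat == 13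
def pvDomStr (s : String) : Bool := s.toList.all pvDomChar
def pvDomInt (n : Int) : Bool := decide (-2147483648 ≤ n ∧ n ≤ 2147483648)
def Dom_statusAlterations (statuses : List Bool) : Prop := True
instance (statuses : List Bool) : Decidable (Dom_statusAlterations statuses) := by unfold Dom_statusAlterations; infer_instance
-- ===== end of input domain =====

-- B replaces A's one-pass three-flag state machine by trimming the trailing/leading Falses and testing the core for a False (objective: alternative).

-- ===== PORT A =====
def statusAlterations (statuses : List Bool) : Bool × Bool × Bool :=
  let left := !((PySem.List.pyGet? statuses 0).getD false)
  let right := !((PySem.List.pyGet? statuses (-1)).getD false)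
  let st := statuses.foldl (fun (st : Bool × Bool × Bool) xi =>
      let middle := st.1
      let stemL := st.2.1
      let gap := st.2.2
      let gap := if !xi && stemL then true else gap
      let stemL := if xi then true else stemL
      let middle := if xi then (if gap then true else middle) else middle
      (middle, stemL, gap)) (false, false, false)
  (left, st.1, right)

-- ===== PORT B =====
-- 'while core and not core[-1]: core.pop()' — drops trailing Falses, step for step
def stripR (core : List Bool) : List Bool :=
  match h : core.getLast? with
  | some false => stripR core.dropLast
  | _ => core
termination_by core.length
decreasing_by
  cases core with
  | nil => simp at h
  | cons a t => simp [List.length_dropLast]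

def statusAlterations_alt (statuses : List Bool) : Bool × Bool × Bool :=
  let left := !((PySem.List.pyGet? statuses 0).getD false)
  let right := !((PySem.List.pyGet? statuses (-1)).getD false)
  let core := statuses
  let core := stripR core
  let core := core.reverse
  let core := stripR core
  (left, core.contains false, right)

-- ===== PRECONDITION & SPEC =====
-- A raises IndexError on the empty list (statuses[0]); B does the same.
def Pre_statusAlterations (statuses : List Bool) : Prop := statuses ≠ []
instance (statuses : List Bool) : Decidable (Pre_statusAlterations statuses) := by unfold Pre_statusAlterations; infer_instance
def pvWitness_statusAlterations : List Bool := [true]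
def Spec_statusAlterations (statuses : List Bool) (out : Bool × Bool × Bool) : Prop := out = statusAlterations_alt statuses
instance (statuses : List Bool) (out : Bool × Bool × Bool) : Decidable (Spec_statusAlterations statuses out) := by unfold Spec_statusAlterations; infer_instance

-- ===== CLAIM (what is proved, stated in full; the proofs are below) =====
def Claim_equal_statusAlterations : Prop := ∀ (statuses : List Bool), Dom_statusAlterations statuses → Pre_statusAlterations statuses → Spec_statusAlterations statuses (statusAlterations statuses)

-- ===== LEMMAS AND PROOFS =====

-- pattern predicates: some True / some False / a False then later a True / ... (proof-only helpers)
def hasT : List Bool → Bool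
  | [] => false
  | x :: r => x || hasT r
def hasF : List Bool → Bool
  | [] => false
  | x :: r => !x || hasF r
def hasFT : List Bool → Bool
  | [] => false
  | x :: r => (!x && hasT r) || hasFT r
def hasTF : List Bool → Bool
  | [] => false
  | x :: r => (x && hasF r) || hasTF r
def hasTFT : List Bool → Bool
  | [] => false
  | x :: r => (x && hasFT r) || hasTFT r

theorem hasT_append (d : List Bool) (b : Bool) : hasT (d ++ [b]) = (hasT d || b) := by
  induction d with
  | nil => simp [hasT]
  | cons x t ih => simp [hasT, ih, Bool.or_assoc]

theorem hasF_append (d : List Bool) (b : Bool) : hasF (d ++ [b]) = (hasF d || !b) := by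
  induction d with
  | nil => simp [hasF]
  | cons x t ih => simp [hasF, ih, Bool.or_assoc]

theorem hasF_reverse (l : List Bool) : hasF l.reverse = hasF l := by
  induction l with
  | nil => rfl
  | cons x t ih => simp [hasF, List.reverse_cons, hasF_append, ih, Bool.or_comm]

theorem hasFT_append (d : List Bool) (b : Bool) : hasFT (d ++ [b]) = (hasFT d || (hasF d && b)) := by
  induction d with
  | nil => simp [hasFT, hasF, hasT]
  | cons x t ih =>
    simp only [List.cons_append, hasFT, hasT_append, hasF, ih]
    cases x <;> cases b <;> cases hasT t <;> cases hasFT t <;> cases hasF t <;> rfl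

theorem hasTF_append (d : List Bool) (b : Bool) : hasTF (d ++ [b]) = (hasTF d || (hasT d && !b)) := by
  induction d with
  | nil => simp [hasTF, hasT, hasF]
  | cons x t ih =>
    simp only [List.cons_append, hasTF, hasF_append, hasT, ih]
    cases x <;> cases b <;> cases hasF t <;> cases hasTF t <;> cases hasT t <;> rfl

theorem hasTFT_append (d : List Bool) (b : Bool) : hasTFT (d ++ [b]) = (hasTFT d || (hasTF d && b)) := by
  induction d with
  | nil => simp [hasTFT, hasTF, hasFT]
  | cons x t ih =>
    simp only [List.cons_append, hasTFT, hasFT_append, hasTF, ih]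
    cases x <;> cases b <;> cases hasFT t <;> cases hasTFT t <;> cases hasF t <;> cases hasTF t <;> rfl

theorem or_absorb (p q a b : Bool) (h1 : (p || a) = a) (h2 : (q || b) = b) :
    ((p || q) || (a || b)) = (a || b) := by
  cases p <;> cases q <;> cases a <;> cases b <;> simp_all

theorem hasFT_or_hasF (d : List Bool) : (hasFT d || hasF d) = hasF d := by
  induction d with
  | nil => rfl
  | cons x t ih => cases x <;> simp [hasFT, hasF, ih]
theorem hasTFT_or_hasTF (d : List Bool) : (hasTFT d || hasTF d) = hasTF d := by
  induction d with
  | nil => rfl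
  | cons x t ih =>
    cases x
    · simpa [hasTFT, hasTF] using ih
    · simp only [hasTFT, hasTF, Bool.true_and]
      exact or_absorb _ _ _ _ (hasFT_or_hasF t) ih

theorem stripR_nil : stripR [] = [] := by simp [stripR]
theorem stripR_concat_false (d : List Bool) : stripR (d ++ [false]) = stripR d := by
  rw [stripR]
  split
  · simp
  · simp_all
theorem stripR_concat_true (d : List Bool) : stripR (d ++ [true]) = d ++ [true] := by
  rw [stripR]; simp

theorem hasF_stripR (m : List Bool) : hasF (stripR m) = hasFT m := by
  induction m using List.reverseRecOn with
  | nil => simp [stripR_nil, hasF, hasFT]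
  | append_singleton d b ih =>
    cases b with
    | false => rw [stripR_concat_false, ih, hasFT_append]; simp
    | true =>
      rw [stripR_concat_true, hasFT_append, hasF_append]
      simp only [Bool.and_true, Bool.not_true, Bool.or_false]
      exact (hasFT_or_hasF d).symm

theorem hasTF_stripR (m : List Bool) : hasTF (stripR m) = hasTFT m := by
  induction m using List.reverseRecOn with
  | nil => simp [stripR_nil, hasTF, hasTFT]
  | append_singleton d b ih =>
    cases b with
    | false => rw [stripR_concat_false, ih, hasTFT_append]; simp
    | true =>
      rw [stripR_concat_true, hasTFT_append, hasTF_append]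
      simp only [Bool.and_true, Bool.not_true, Bool.and_false, Bool.or_false]
      exact (hasTFT_or_hasTF d).symm

theorem hasFT_reverse (m : List Bool) : hasFT m.reverse = hasTF m := by
  induction m with
  | nil => rfl
  | cons x t ih =>
    simp only [hasTF, List.reverse_cons, hasFT_append, ih, hasF_reverse]
    cases x <;> cases hasF t <;> cases hasTF t <;> rfl

theorem contains_false_eq_hasF (l : List Bool) : l.contains false = hasF l := by
  induction l with
  | nil => rfl
  | cons x t ih => cases x <;> simp_all [hasF]

-- B's middle is the T..F..T pattern test
theorem middle_alt (l : List Bool) :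
    (stripR (stripR l).reverse).contains false = hasTFT l := by
  rw [contains_false_eq_hasF, hasF_stripR, hasFT_reverse, hasTF_stripR]

-- the boolean step identity for A's fold invariant
theorem step_bool (x m s g a f ft tf tft : Bool) :
    ((if x then (if (if (!x && s) then true else g) then true else m) else m) ||
        ((if (!x && s) then true else g) && a) ||
        ((if x then true else s) && ft) || tft,
      (if x then true else s) || a,
      (if (!x && s) then true else g) || ((if x then true else s) && f) || tf) =
    (m || (g && (x || a)) || (s && ((!x && a) || ft)) || ((x && ft) || tft),
      s || (x || a),
      g || (s && (!x || f)) || ((x && f) || tf)) := by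
  cases x <;> cases m <;> cases s <;> cases g <;> cases a <;> cases f <;> cases ft <;>
    cases tf <;> cases tft <;> rfl

-- A's fold invariant
theorem foldA (l : List Bool) (m s g : Bool) :
    l.foldl (fun (st : Bool × Bool × Bool) xi =>
      let middle := st.1
      let stemL := st.2.1
      let gap := st.2.2
      let gap := if !xi && stemL then true else gap
      let stemL := if xi then true else stemL
      let middle := if xi then (if gap then true else middle) else middle
      (middle, stemL, gap)) (m, s, g) =
    ((m || (g && hasT l) || (s && hasFT l) || hasTFT l),
      (s || hasT l),
      (g || (s && hasF l) || hasTF l)) := by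
  induction l generalizing m s g with
  | nil => simp [hasT, hasF, hasFT, hasTF, hasTFT]
  | cons x t ih =>
    simp only [List.foldl_cons, ih]
    simp only [hasT, hasF, hasFT, hasTF, hasTFT]
    exact step_bool x m s g (hasT t) (hasF t) (hasFT t) (hasTF t) (hasTFT t)

-- ===== VERDICT (by name: the statement is the Claim_ definition above) =====
theorem statusAlterations_spec : Claim_equal_statusAlterations := by
  intro statuses _ _
  unfold Spec_statusAlterations statusAlterations statusAlterations_alt
  simp only [foldA, middle_alt]
  simp
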